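-- pv_equiv track=rewrite | github.com/pypi-data/pypi-mirror-350 | packages/coastal-dynamics/coastal_dynamics-1.0.1.tar.gz/coastal_dynamics-1.0.1/src/coastal_dynamics/modify_notebooks.py | clear_answers
-- ===== SOURCE A (Python) =====
-- def clear_answers(
--     notebook, begin_key="#BEGIN_CORRECT_ANSWER", end_key="#END_CORRECT_ANSWER"
-- ):
--     """Modify the notebook (i.e., remove all notebooks for a given beginning and end key).
--     A notebook consists of a dictionary with keys:
--         - "cells" (containing a list of cells)
--         - "metadata"
--         - "nbformat"
--         - "nbformat_minor"
--     We need to look at the "source" key of each cell in the list of cells.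
--     """
--
--     number_of_answers_removed = 0
--
--     # loop through cells
--     for i_cell in range(len(notebook["cells"])):
--         source = notebook["cells"][i_cell]["source"]
--
--         for i, begin_line in enumerate(source):
--             if begin_key in begin_line:
--                 for j, end_line in enumerate(source[i:]):
--                     if end_key in end_line:
--                         source = source[:i] + source[i + j + 1 :]
--
--                         number_of_answers_removed += 1
--
--                         break
--                 break
--
--         notebook["cells"][i_cell]["source"] = source
--
--     return notebook, number_of_answers_removed
-- ===== SOURCE B (Python) =====
-- def clear_answers(
--     notebook, begin_key="#BEGIN_CORRECT_ANSWER", end_key="#END_CORRECT_ANSWER"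
-- ):
--     """Single forward pass per cell: buffer lines from the begin marker until the
--     end marker; drop the buffer (one removal per cell) or flush it if no end marker.
--     Mutates the cells in place, like the original."""
--     number_of_answers_removed = 0
--
--     for cell in notebook["cells"]:
--         out = []
--         buffer = None
--         removed = False
--         for line in cell["source"]:
--             if removed:
--                 out.append(line)
--             elif buffer is None:
--                 if begin_key in line:
--                     if end_key in line:
--                         removed = True
--                         number_of_answers_removed += 1
--                     else:
--                         buffer = [line]
--                 else:
--                     out.append(line)
--             else:
--                 buffer.append(line)
--                 if end_key in line:
--                     buffer = None
--                     removed = True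
--                     number_of_answers_removed += 1
--         if buffer is not None:
--             out.extend(buffer)
--         cell["source"] = out
--
--     return notebook, number_of_answers_removed
-- ===== Notes on version B (the rewrite author's own statement) =====
-- stated objective: alternative
-- what changed: Replaces the per-cell index-find (enumerate to locate the begin line, a second enumerate over the slice to locate the end line, then slice-and-concatenate) with one forward pass per cell that keeps an output list, a buffer opened at the begin marker and discarded at the end marker (flushed unchanged if no end marker), and a per-cell removed latch.
import Mathlib
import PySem

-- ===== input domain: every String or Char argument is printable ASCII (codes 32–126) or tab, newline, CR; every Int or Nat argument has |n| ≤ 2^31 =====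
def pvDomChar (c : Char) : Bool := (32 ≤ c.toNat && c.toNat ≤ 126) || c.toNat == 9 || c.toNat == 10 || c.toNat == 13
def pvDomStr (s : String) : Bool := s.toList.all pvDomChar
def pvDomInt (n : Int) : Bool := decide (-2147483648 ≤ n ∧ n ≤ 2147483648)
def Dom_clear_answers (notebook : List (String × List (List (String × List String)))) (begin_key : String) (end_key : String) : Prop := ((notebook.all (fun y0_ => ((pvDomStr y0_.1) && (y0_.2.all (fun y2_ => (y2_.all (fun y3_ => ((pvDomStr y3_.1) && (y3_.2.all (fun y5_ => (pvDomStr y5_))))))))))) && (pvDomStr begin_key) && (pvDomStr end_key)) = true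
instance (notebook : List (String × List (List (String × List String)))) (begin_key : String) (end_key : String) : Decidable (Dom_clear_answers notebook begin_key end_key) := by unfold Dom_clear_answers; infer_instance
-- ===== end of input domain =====

-- B replaces A's per-cell enumerate/slice removal with a single forward pass (buffer + latch);
-- both mutate the notebook's cells in place in Python, and the theorem is about the return value.

abbrev CellT : Type := List (String × List String)

-- ===== PORT A =====
-- inner loop: for j, end_line in enumerate(source[i:]): if end_key in end_line: … break
def aFindEnd (end_key : String) : List (Int × String) → Option Int
  | [] => none
  | (j, end_line) :: rest =>
    if PySem.Str.isIn end_key end_line then some j else aFindEnd end_key rest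

-- middle loop: for i, begin_line in enumerate(source): if begin_key in begin_line: … break
def aFindBegin (begin_key end_key : String) (source : List String) :
    List (Int × String) → List String × Int
  | [] => (source, 0)
  | (i, begin_line) :: _rest =>
    if PySem.Str.isIn begin_key begin_line then
      match aFindEnd end_key (PySem.List.enumerate (PySem.List.slice source (some i) none)) with
      | some j =>
          (PySem.List.slice source none (some i) ++ PySem.List.slice source (some (i + j + 1)) none, 1)
      | none => (source, 0)
    else aFindBegin begin_key end_key source _rest

-- one iteration of `for i_cell in range(len(notebook["cells"]))`
def aStep (begin_key end_key : String)
    (st : PySem.Dict String (List CellT) × Int) (i_cell : Int) :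
    PySem.Dict String (List CellT) × Int :=
  match st.1.get? "cells" with
  | none => st        -- unreachable under Pre_ (Python raises KeyError)
  | some cells =>
    match PySem.List.pyGet? cells i_cell with
    | none => st      -- unreachable: i_cell ranges over range(len(cells))
    | some cell =>
      match (PySem.Dict.mk cell).get? "source" with
      | none => st    -- unreachable under Pre_ (Python raises KeyError)
      | some source =>
        let r := aFindBegin begin_key end_key source (PySem.List.enumerate source)
        let cell' := ((PySem.Dict.mk cell).insert "source" r.1).items
        -- notebook["cells"][i_cell]["source"] = source  (i_cell ≥ 0 and in range here)
        (st.1.insert "cells" (cells.set i_cell.toNat cell'), st.2 + r.2)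

def clear_answers (notebook : List (String × List (List (String × List String)))) (begin_key : String) (end_key : String) : (List (String × List (List (String × List String)))) × Int :=
  let nb := PySem.Dict.mk notebook
  match nb.get? "cells" with
  | none => (notebook, 0)   -- unreachable under Pre_ (Python raises KeyError)
  | some cells0 =>
    let st := (PySem.List.pyRange 0 (PySem.List.len cells0) 1).foldl
      (aStep begin_key end_key) (nb, 0)
    (st.1.items, st.2)

-- ===== PORT B =====
-- after the removal latch is set: out.append(line) for each remaining line
def bAfter (out : List String) : List String → List String
  | [] => out
  | l :: ls => bAfter (out ++ [l]) ls

-- buffering mode: append to buffer; on end marker drop the buffer, latch, count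
def bBuf (end_key : String) (out buf : List String) : List String → List String × Int
  | [] => (out ++ buf, 0)                -- no end marker: flush the buffer unchanged
  | l :: ls =>
    let buf' := buf ++ [l]
    if PySem.Str.isIn end_key l then (bAfter out ls, 1) else bBuf end_key out buf' ls

-- scanning mode: copy lines until a begin marker opens the buffer
def bScan (begin_key end_key : String) (out : List String) : List String → List String × Int
  | [] => (out, 0)
  | l :: ls =>
    if PySem.Str.isIn begin_key l then
      if PySem.Str.isIn end_key l then (bAfter out ls, 1)
      else bBuf end_key out [l] ls
    else bScan begin_key end_key (out ++ [l]) ls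

-- body of `for cell in notebook["cells"]`
def bCellStep (begin_key end_key : String) (st : List CellT × Int) (cell : CellT) :
    List CellT × Int :=
  match (PySem.Dict.mk cell).get? "source" with
  | none => (st.1 ++ [cell], st.2)   -- unreachable under Pre_ (Python raises KeyError)
  | some src =>
    let r := bScan begin_key end_key [] src
    (st.1 ++ [((PySem.Dict.mk cell).insert "source" r.1).items], st.2 + r.2)

def clear_answers_alt (notebook : List (String × List (List (String × List String)))) (begin_key : String) (end_key : String) : (List (String × List (List (String × List String)))) × Int :=
  let nb := PySem.Dict.mk notebook
  match nb.get? "cells" with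
  | none => (notebook, 0)   -- unreachable under Pre_ (Python raises KeyError)
  | some cells =>
    let st := cells.foldl (bCellStep begin_key end_key) ([], 0)
    ((nb.insert "cells" st.1).items, st.2)

-- ===== PRECONDITION & SPEC =====
-- Pre_ excludes (a) inputs on which Python raises KeyError ("cells" missing, or a cell of
-- "cells" missing "source"), and (b) association lists with duplicate keys in the notebook
-- or in any cell, which cannot arise from an actual Python dict (A's argument is a dict).
def Pre_clear_answers (notebook : List (String × List (List (String × List String)))) (begin_key : String) (end_key : String) : Prop :=
  (notebook.map Prod.fst).Nodup ∧
  (∀ p ∈ notebook, ∀ cell ∈ p.2, (cell.map Prod.fst).Nodup) ∧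
  "cells" ∈ notebook.map Prod.fst ∧
  (∀ p ∈ notebook, p.1 = "cells" → ∀ cell ∈ p.2, "source" ∈ cell.map Prod.fst)
instance (notebook : List (String × List (List (String × List String)))) (begin_key : String) (end_key : String) : Decidable (Pre_clear_answers notebook begin_key end_key) := by unfold Pre_clear_answers; infer_instance

def pvWitness_clear_answers : (List (String × List (List (String × List String)))) × String × String :=
  ([("cells", [[("source", ["x", "#B", "y", "#E", "z"])]])], "#B", "#E")

def Spec_clear_answers (notebook : List (String × List (List (String × List String)))) (begin_key : String) (end_key : String) (out : (List (String × List (List (String × List String)))) × Int) : Prop := out = clear_answers_alt notebook begin_key end_key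
instance (notebook : List (String × List (List (String × List String)))) (begin_key : String) (end_key : String) (out : (List (String × List (List (String × List String)))) × Int) : Decidable (Spec_clear_answers notebook begin_key end_key out) := by unfold Spec_clear_answers; infer_instance

-- ===== CLAIM (what is proved, stated in full; the proofs are below) =====
def Claim_equal_clear_answers : Prop := ∀ (notebook : List (String × List (List (String × List String)))) (begin_key : String) (end_key : String), Dom_clear_answers notebook begin_key end_key → Pre_clear_answers notebook begin_key end_key → Spec_clear_answers notebook begin_key end_key (clear_answers notebook begin_key end_key)

-- ===== LEMMAS AND PROOFS =====

-- index of the first line satisfying p (proof-side characterisation of both ports)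
def firstIdx (p : String → Bool) : List String → Option Nat
  | [] => none
  | l :: ls => if p l then some 0 else (firstIdx p ls).map (· + 1)

-- what one cell's source becomes, plus the number of removals (0 or 1)
def specCell (begin_key end_key : String) (src : List String) : List String × Int :=
  match firstIdx (fun l => PySem.Chars.isIn begin_key.toList l.toList) src with
  | none => (src, 0)
  | some i =>
    match firstIdx (fun l => PySem.Chars.isIn end_key.toList l.toList) (src.drop i) with
    | none => (src, 0)
    | some j => (src.take i ++ src.drop (i + j + 1), 1)

-- per-cell transform as both ports perform it
def gcell (begin_key end_key : String) (cell : CellT) : CellT × Int :=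
  match (PySem.Dict.mk cell).get? "source" with
  | none => (cell, 0)
  | some src =>
    (((PySem.Dict.mk cell).insert "source" (specCell begin_key end_key src).1).items,
      (specCell begin_key end_key src).2)

theorem bAfter_eq (ls out : List String) : bAfter out ls = out ++ ls := by
  induction ls generalizing out with
  | nil => simp [bAfter]
  | cons l ls ih => simp [bAfter, ih]

theorem bBuf_eq (ek : String) (ls : List String) : ∀ out buf,
    bBuf ek out buf ls =
      match firstIdx (fun l => PySem.Chars.isIn ek.toList l.toList) ls with
      | some j => (out ++ ls.drop (j + 1), 1)
      | none => (out ++ buf ++ ls, 0) := by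
  induction ls with
  | nil => intro out buf; simp [bBuf, firstIdx]
  | cons l ls ih =>
    intro out buf
    by_cases h : PySem.Chars.isIn ek.toList l.toList = true
    · simp [bBuf, firstIdx, h, bAfter_eq]
    · simp only [bBuf, firstIdx, PySem.Str.isIn_eq, h, Bool.false_eq_true, if_false, ih]
      cases hf : firstIdx (fun l => PySem.Chars.isIn ek.toList l.toList) ls with
      | none => simp
      | some j => simp

theorem bScan_eq (bk ek : String) (ls : List String) : ∀ out,
    bScan bk ek out ls =
      match firstIdx (fun l => PySem.Chars.isIn bk.toList l.toList) ls with
      | none => (out ++ ls, 0)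
      | some i =>
        match firstIdx (fun l => PySem.Chars.isIn ek.toList l.toList) (ls.drop i) with
        | none => (out ++ ls, 0)
        | some j => (out ++ ls.take i ++ ls.drop (i + j + 1), 1) := by
  induction ls with
  | nil => intro out; simp [bScan, firstIdx]
  | cons l ls ih =>
    intro out
    by_cases hb : PySem.Chars.isIn bk.toList l.toList = true
    · by_cases he : PySem.Chars.isIn ek.toList l.toList = true
      · simp [bScan, firstIdx, hb, he, bAfter_eq]
      · simp only [bScan, PySem.Str.isIn_eq, hb, if_true, he, Bool.false_eq_true, if_false, bBuf_eq]
        simp only [firstIdx, hb, if_true, he, Bool.false_eq_true, if_false, List.drop_zero]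
        cases hf : firstIdx (fun l => PySem.Chars.isIn ek.toList l.toList) ls with
        | none => simp
        | some j => simp [List.drop_succ_cons]
    · simp only [bScan, PySem.Str.isIn_eq, hb, Bool.false_eq_true, if_false, ih]
      simp only [firstIdx, hb, Bool.false_eq_true, if_false]
      cases hf : firstIdx (fun l => PySem.Chars.isIn bk.toList l.toList) ls with
      | none => simp
      | some i =>
        simp only [Option.map_some, List.drop_succ_cons, List.take_succ_cons]
        cases hg : firstIdx (fun l => PySem.Chars.isIn ek.toList l.toList) (ls.drop i) with
        | none => simp
        | some j => simp [Nat.add_right_comm]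

theorem bScan_spec (bk ek : String) (src : List String) :
    bScan bk ek [] src = specCell bk ek src := by
  rw [bScan_eq]
  unfold specCell
  cases firstIdx (fun l => PySem.Chars.isIn bk.toList l.toList) src with
  | none => simp
  | some i =>
    cases firstIdx (fun l => PySem.Chars.isIn ek.toList l.toList) (src.drop i) with
    | none => simp
    | some j => simp

theorem aFindEnd_eq (ek : String) (xs : List String) : ∀ s : Nat,
    aFindEnd ek (PySem.List.enumerate xs (s : Int)) =
      (firstIdx (fun l => PySem.Chars.isIn ek.toList l.toList) xs).map (fun j => ((s + j : Nat) : Int)) := by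
  induction xs with
  | nil => intro s; simp [aFindEnd, firstIdx, PySem.List.enumerate_nil]
  | cons x xs ih =>
    intro s
    rw [PySem.List.enumerate_cons]
    by_cases h : PySem.Chars.isIn ek.toList x.toList = true
    · simp [aFindEnd, firstIdx, h]
    · have hcast : ((s : Int) + 1) = ((s + 1 : Nat) : Int) := by push_cast; ring
      simp only [aFindEnd, PySem.Str.isIn_eq, h, Bool.false_eq_true, if_false, hcast, ih]
      simp only [firstIdx, h, Bool.false_eq_true, if_false, Option.map_map]
      cases firstIdx (fun l => PySem.Chars.isIn ek.toList l.toList) xs with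
      | none => simp
      | some j => simp; omega

theorem aFindBegin_eq (bk ek : String) (ls : List String) : ∀ (s : Nat) (src : List String),
    src.drop s = ls →
    aFindBegin bk ek src (PySem.List.enumerate ls (s : Int)) =
      match firstIdx (fun l => PySem.Chars.isIn bk.toList l.toList) ls with
      | none => (src, 0)
      | some i =>
        match firstIdx (fun l => PySem.Chars.isIn ek.toList l.toList) (ls.drop i) with
        | none => (src, 0)
        | some j => (src.take (s + i) ++ src.drop (s + i + j + 1), 1) := by
  induction ls with
  | nil => intro s src _; simp [aFindBegin, firstIdx, PySem.List.enumerate_nil]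
  | cons l ls ih =>
    intro s src hdrop
    rw [PySem.List.enumerate_cons]
    by_cases hb : PySem.Chars.isIn bk.toList l.toList = true
    · simp only [aFindBegin, PySem.Str.isIn_eq, hb, if_true]
      have h0 := aFindEnd_eq ek (l :: ls) 0
      simp only [Nat.cast_zero, Nat.zero_add] at h0
      rw [PySem.List.slice_from_natCast, hdrop, h0]
      have hfb : firstIdx (fun x => PySem.Chars.isIn bk.toList x.toList) (l :: ls) = some 0 := by
        simp [firstIdx, hb]
      rw [hfb]
      simp only [List.drop_zero]
      cases hg : firstIdx (fun x => PySem.Chars.isIn ek.toList x.toList) (l :: ls) with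
      | none => simp
      | some j =>
        simp only [Option.map_some]
        have h2 : ((s : Int) + (j : Int) + 1) = (((s + j + 1 : Nat)) : Int) := by push_cast; ring
        rw [h2, PySem.List.slice_to_natCast, PySem.List.slice_from_natCast]
        simp
    · simp only [aFindBegin, PySem.Str.isIn_eq, hb, Bool.false_eq_true, if_false]
      have hdrop' : src.drop (s + 1) = ls := by
        rw [← List.tail_drop, hdrop]; rfl
      have hcast : ((s : Int) + 1) = ((s + 1 : Nat) : Int) := by push_cast; ring
      rw [hcast, ih (s + 1) src hdrop']
      simp only [firstIdx, hb, Bool.false_eq_true, if_false]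
      cases hf : firstIdx (fun x => PySem.Chars.isIn bk.toList x.toList) ls with
      | none => simp
      | some i =>
        simp only [Option.map_some, List.drop_succ_cons]
        cases hg : firstIdx (fun x => PySem.Chars.isIn ek.toList x.toList) (ls.drop i) with
        | none => simp
        | some j =>
          have e1 : s + 1 + i = s + (i + 1) := by omega
          simp [e1]

theorem aFindBegin_spec (bk ek : String) (src : List String) :
    aFindBegin bk ek src (PySem.List.enumerate src) = specCell bk ek src := by
  have h := aFindBegin_eq bk ek src 0 src (by simp)
  simp only [Nat.cast_zero] at h
  rw [show PySem.List.enumerate src = PySem.List.enumerate src 0 from rfl, h]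
  unfold specCell
  cases firstIdx (fun l => PySem.Chars.isIn bk.toList l.toList) src with
  | none => simp
  | some i =>
    cases firstIdx (fun l => PySem.Chars.isIn ek.toList l.toList) (src.drop i) with
    | none => simp
    | some j => simp

theorem insert_self_of_get? {ν : Type} (d : PySem.Dict String ν) (k : String) (v : ν)
    (hnd : d.keys.Nodup) (hget : d.get? k = some v) : d.insert k v = d := by
  apply PySem.Dict.ext
  have hc : d.contains k = true := by
    rw [PySem.Dict.contains_eq_isSome_get?, hget]; rfl
  rw [PySem.Dict.items_insert_of_contains d v hc]
  have hall : ∀ p ∈ d.items, (if p.1 == k then (k, v) else p) = p := by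
    intro p hp
    by_cases hpk : p.1 = k
    · have hg2 : d.get? p.1 = some p.2 := PySem.Dict.get?_of_mem_items d (by simpa using hp) hnd
      rw [hpk, hget] at hg2
      have hv : p.2 = v := (Option.some_inj.mp hg2).symm
      subst hpk
      simp [← hv]
    · simp [hpk]
  rw [List.map_congr_left hall]; simp

theorem bLoop_eq (bk ek : String) (cells : List CellT) : ∀ (acc : List CellT) (n : Int),
    cells.foldl (bCellStep bk ek) (acc, n) =
      (acc ++ cells.map (fun c => (gcell bk ek c).1),
        n + (cells.map (fun c => (gcell bk ek c).2)).sum) := by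
  induction cells with
  | nil => intro acc n; simp
  | cons cell cells ih =>
    intro acc n
    rw [List.foldl_cons]
    have hstep : bCellStep bk ek (acc, n) cell =
        (acc ++ [(gcell bk ek cell).1], n + (gcell bk ek cell).2) := by
      unfold bCellStep gcell
      cases hs : (PySem.Dict.mk cell).get? "source" with
      | none => simp
      | some src => simp [bScan_spec]
    rw [hstep, ih]
    simp [add_assoc]

theorem aLoop_eq (bk ek : String) (cells0 : List CellT) (nb0 : PySem.Dict String (List CellT)) :
    ∀ (d k : Nat) (c : Int), k + d = cells0.length →
    (PySem.List.pyRange (k : Int) (cells0.length : Int) 1).foldl (aStep bk ek)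
        (nb0.insert "cells" ((cells0.take k).map (fun x => (gcell bk ek x).1) ++ cells0.drop k), c)
      = (nb0.insert "cells" (cells0.map (fun x => (gcell bk ek x).1)),
          c + ((cells0.drop k).map (fun x => (gcell bk ek x).2)).sum) := by
  intro d
  induction d with
  | zero =>
    intro k c hk
    have hk' : k = cells0.length := by omega
    subst hk'
    rw [PySem.List.pyRange_one_eq_nil (le_refl _)]
    simp
  | succ d ih =>
    intro k c hk
    have hklt : k < cells0.length := by omega
    have hlen : ((cells0.take k).map (fun x => (gcell bk ek x).1)).length = k := by
      simp [Nat.le_of_lt hklt]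
    have hsplit : cells0.drop k = cells0[k] :: cells0.drop (k + 1) :=
      List.drop_eq_getElem_cons hklt
    have htake : cells0.take (k + 1) = cells0.take k ++ [cells0[k]] := by
      rw [List.take_add_one, List.getElem?_eq_getElem hklt]; rfl
    rw [PySem.List.pyRange_one_cons (by exact_mod_cast hklt), List.foldl_cons]
    have hgetv : (PySem.List.pyGet?
        ((cells0.take k).map (fun x => (gcell bk ek x).1) ++ cells0.drop k) (k : Int))
        = some cells0[k] := by
      rw [PySem.List.pyGet?_natCast, List.getElem?_append_right (by omega),
        hlen, Nat.sub_self, hsplit]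
      rfl
    have hstep : aStep bk ek
        (nb0.insert "cells" ((cells0.take k).map (fun x => (gcell bk ek x).1) ++ cells0.drop k), c)
        (k : Int)
      = (nb0.insert "cells"
          ((cells0.take (k+1)).map (fun x => (gcell bk ek x).1) ++ cells0.drop (k+1)),
          c + (gcell bk ek cells0[k]).2) := by
      unfold aStep
      rw [PySem.Dict.get?_insert_self]
      simp only
      rw [hgetv]
      simp only
      have hsetv : ∀ x, (((cells0.take k).map (fun y => (gcell bk ek y).1) ++ cells0.drop k).set
          ((k : Int)).toNat x)
          = (cells0.take k).map (fun y => (gcell bk ek y).1) ++ x :: cells0.drop (k+1) := by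
        intro x
        rw [Int.toNat_natCast, List.set_append, if_neg (by omega), hlen, Nat.sub_self, hsplit]
        rfl
      cases hs : (PySem.Dict.mk cells0[k]).get? "source" with
      | none =>
        have hgc : gcell bk ek cells0[k] = (cells0[k], 0) := by
          unfold gcell; rw [hs]
        have hfst : (gcell bk ek cells0[k]).1 = cells0[k] := by rw [hgc]
        have hveq : (cells0.take (k+1)).map (fun x => (gcell bk ek x).1) ++ cells0.drop (k+1)
            = (cells0.take k).map (fun x => (gcell bk ek x).1) ++ cells0.drop k := by
          rw [htake, List.map_append, List.append_assoc, hsplit, List.map_cons, List.map_nil,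
            List.singleton_append, hfst]
        rw [hveq, hgc]
        simp
      | some src =>
        have hgc : gcell bk ek cells0[k]
            = (((PySem.Dict.mk cells0[k]).insert "source" (specCell bk ek src).1).items,
                (specCell bk ek src).2) := by
          unfold gcell; rw [hs]
        simp only [aFindBegin_spec, hsetv, PySem.Dict.insert_insert_self]
        rw [htake, List.map_append]
        simp [hgc]
    rw [hstep]
    have hcast : ((k : Int) + 1) = ((k + 1 : Nat) : Int) := by push_cast; ring
    rw [hcast, ih (k + 1) (c + (gcell bk ek cells0[k]).2) (by omega)]
    have hsum : (cells0.drop k).map (fun x => (gcell bk ek x).2)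
        = (gcell bk ek cells0[k]).2 :: (cells0.drop (k+1)).map (fun x => (gcell bk ek x).2) := by
      rw [hsplit]; rfl
    rw [hsum, List.sum_cons]
    congr 1
    ring

-- ===== VERDICT (by name: the statement is the Claim_ definition above) =====
theorem clear_answers_spec : Claim_equal_clear_answers := by
  intro notebook bk ek _hdom hpre
  obtain ⟨hnd, _hcnd, hmem, _hsrc⟩ := hpre
  unfold Spec_clear_answers
  simp only [clear_answers, clear_answers_alt]
  have hknd : (PySem.Dict.mk notebook).keys.Nodup := by
    simpa [PySem.Dict.keys] using hnd
  obtain ⟨cells0, hget⟩ : ∃ v, (PySem.Dict.mk notebook).get? "cells" = some v := by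
    cases hg : (PySem.Dict.mk notebook).get? "cells" with
    | none =>
      rw [PySem.Dict.get?_eq_none_iff_not_mem_keys] at hg
      exact absurd (by simpa [PySem.Dict.keys] using hmem) hg
    | some v => exact ⟨v, rfl⟩
  rw [hget]
  have hini : (PySem.Dict.mk notebook).insert "cells" cells0 = PySem.Dict.mk notebook :=
    insert_self_of_get? _ _ _ hknd hget
  have hA := aLoop_eq bk ek cells0 (PySem.Dict.mk notebook) cells0.length 0 0
    (by omega)
  simp only [List.take_zero, List.map_nil, List.nil_append, List.drop_zero, Nat.cast_zero,
    hini] at hA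
  simp only [PySem.List.len_eq]
  rw [hA, bLoop_eq]
  simp
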